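-- pv_equiv track=rewrite | github.com/cathoderay/codechef | contests/november-challenge-2019/FAILURE.py | gcycle
-- ===== SOURCE A (Python) =====
-- def path_to_k(px, k, p):
--     for i in px:
--         if i == k: break
--         p.append(i)
--     return p
--
-- def gcycle(pa, pb):
--     p, a, b, k = [], set(pa), set(pb), None
--     x = pa if len(pa) < len(pb) else pb
--     for i in x:
--         p.append(i)
--         if i in a and i in b:
--             k = i
--             break
--     p = path_to_k(pb if x == pa else pa, k, p)
--     return frozenset(p)
-- ===== SOURCE B (Python) =====
-- def gcycle(pa, pb):
--     x, other = (pa, pb) if len(pa) < len(pb) else (pb, pa)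
--     posx, poso = {}, {}
--     for i, v in enumerate(x):
--         posx.setdefault(v, i)
--     for i, v in enumerate(other):
--         poso.setdefault(v, i)
--     common = posx.keys() & poso.keys()
--     if not common:
--         return frozenset(posx) | frozenset(poso)
--     k = min(common, key=posx.get)
--     return frozenset(v for v in posx if posx[v] <= posx[k]) | \
--            frozenset(v for v in poso if poso[v] < poso[k])
-- ===== Notes on version B (the rewrite author's own statement) =====
-- stated objective: alternative
-- what changed: Replaces A's break-out scan with a threaded accumulator list and the path_to_k helper by index dictionaries: build a first-occurrence-position dict per list, pick the common node as the argmin of position over the key-set intersection, and assemble the result as the union of two position-filtered key sets.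
import Mathlib
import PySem

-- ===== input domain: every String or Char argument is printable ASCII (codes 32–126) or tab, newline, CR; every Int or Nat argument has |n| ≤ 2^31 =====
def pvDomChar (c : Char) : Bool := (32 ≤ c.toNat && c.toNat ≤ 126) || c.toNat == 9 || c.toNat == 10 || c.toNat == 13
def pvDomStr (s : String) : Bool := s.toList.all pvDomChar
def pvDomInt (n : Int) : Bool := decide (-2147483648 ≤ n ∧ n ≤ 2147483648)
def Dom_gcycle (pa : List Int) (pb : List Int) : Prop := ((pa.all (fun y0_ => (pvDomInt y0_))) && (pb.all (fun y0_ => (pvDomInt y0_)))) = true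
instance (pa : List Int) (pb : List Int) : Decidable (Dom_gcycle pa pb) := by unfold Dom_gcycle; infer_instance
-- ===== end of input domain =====

-- B replaces A's scan-with-break plus the path_to_k accumulator helper by index dictionaries:
-- one first-occurrence-position dict per list, the common node as an argmin over the key-set
-- intersection, and the two contributions as position-filtered key lists (objective: alternative).

-- ===== PORT A =====
-- helper path_to_k(px, k, p): append elements of px to p until one equals k
def path_to_k (px : List Int) (k : Option Int) (p : List Int) : List Int :=
  match px with
  | [] => p
  | i :: rest => if some i = k then p else path_to_k rest k (p ++ [i])

-- the 'for i in x: p.append(i); if i in a and i in b: k = i; break' loop (state: appended part of p, and k)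
def gcycleLoop (a b : PySem.Set Int) : List Int → List Int × Option Int
  | [] => ([], none)
  | i :: rest =>
      if (PySem.Set.contains a i && PySem.Set.contains b i) then ([i], some i)
      else
        let r := gcycleLoop a b rest
        (i :: r.1, r.2)

def gcycle (pa : List Int) (pb : List Int) : List Int :=
  let a := PySem.Set.ofList pa
  let b := PySem.Set.ofList pb
  let x := if pa.length < pb.length then pa else pb
  let r := gcycleLoop a b x
  let p := path_to_k (if x = pa then pb else pa) r.2 r.1
  PySem.Set.ofList p

-- ===== PORT B =====
-- 'pos = {}; for i, v in enumerate(l): pos.setdefault(v, i)' (first-occurrence positions)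
def firstPosLoop (l : List Int) : PySem.Dict Int Int :=
  (PySem.List.enumerate l).foldl (fun d iv => PySem.Dict.setdefault d iv.2 iv.1) PySem.Dict.empty

def gcycle_alt (pa : List Int) (pb : List Int) : List Int :=
  let xo := if pa.length < pb.length then (pa, pb) else (pb, pa)
  let posx := firstPosLoop xo.1
  let poso := firstPosLoop xo.2
  let common : PySem.Set Int := PySem.Set.inter (PySem.Set.ofList posx.keys) poso.keys
  -- 'if not common: … / k = min(common, key=posx.get)': min? is none exactly on the empty set,
  -- so the guard and the min are one match; posx.get is total on common, ported as getD _ 0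
  match PySem.List.min? common (fun v => PySem.Dict.getD posx v 0) with
  | none => PySem.Set.union (PySem.Set.ofList posx.keys) (PySem.Set.ofList poso.keys)
  | some k =>
      PySem.Set.union
        (PySem.Set.ofList (posx.keys.filter
          (fun v => PySem.Dict.getD posx v 0 ≤ PySem.Dict.getD posx k 0)))
        (PySem.Set.ofList (poso.keys.filter
          (fun v => PySem.Dict.getD poso v 0 < PySem.Dict.getD poso k 0)))

-- ===== PRECONDITION & SPEC =====
def Spec_gcycle (pa : List Int) (pb : List Int) (out : List Int) : Prop := out = gcycle_alt pa pb
instance (pa : List Int) (pb : List Int) (out : List Int) : Decidable (Spec_gcycle pa pb out) := by unfold Spec_gcycle; infer_instance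

-- ===== CLAIM (what is proved, stated in full; the proofs are below) =====
def Claim_equal_gcycle : Prop := ∀ (pa : List Int) (pb : List Int), Dom_gcycle pa pb → Spec_gcycle pa pb (gcycle pa pb)

-- ===== LEMMAS AND PROOFS =====

theorem path_to_k_eq (px : List Int) (k : Option Int) (p : List Int) :
    path_to_k px k p = p ++ px.takeWhile (fun i => !decide (some i = k)) := by
  induction px generalizing p with
  | nil => simp [path_to_k]
  | cons i rest ih =>
    by_cases h : some i = k <;> simp [path_to_k, h, ih]

theorem find?_congr_mem (l : List Int) (p q : Int → Bool) (h : ∀ i ∈ l, p i = q i) :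
    l.find? p = l.find? q := by
  induction l with
  | nil => rfl
  | cons i rest ih =>
    have hi := h i (by simp)
    by_cases hp : p i = true
    · rw [List.find?_cons_of_pos hp, List.find?_cons_of_pos (hi ▸ hp)]
    · rw [List.find?_cons_of_neg (by simpa using hp),
        List.find?_cons_of_neg (by rw [← hi]; simpa using hp),
        ih (fun j hj => h j (by simp [hj]))]

theorem gcycleLoop_eq (a b : PySem.Set Int) (x : List Int) :
    gcycleLoop a b x =
      match x.find? (fun i => PySem.Set.contains a i && PySem.Set.contains b i) with
      | none => (x, none)
      | some v => (x.takeWhile (fun i => !decide (i = v)) ++ [v], some v) := by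
  induction x with
  | nil => rfl
  | cons i rest ih =>
    by_cases h : (PySem.Set.contains a i && PySem.Set.contains b i) = true
    · rw [show List.find? (fun j => PySem.Set.contains a j && PySem.Set.contains b j) (i :: rest)
            = some i from List.find?_cons_of_pos h]
      rw [show gcycleLoop a b (i :: rest)
            = if (PySem.Set.contains a i && PySem.Set.contains b i) then ([i], some i)
              else (i :: (gcycleLoop a b rest).1, (gcycleLoop a b rest).2) from rfl,
         if_pos h]
      simp
    · rw [show List.find? (fun j => PySem.Set.contains a j && PySem.Set.contains b j) (i :: rest)
            = List.find? (fun j => PySem.Set.contains a j && PySem.Set.contains b j) rest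
          from List.find?_cons_of_neg (by simpa using h)]
      rw [show gcycleLoop a b (i :: rest)
            = if (PySem.Set.contains a i && PySem.Set.contains b i) then ([i], some i)
              else (i :: (gcycleLoop a b rest).1, (gcycleLoop a b rest).2) from rfl,
         if_neg h, ih]
      cases hf : List.find? (fun j => PySem.Set.contains a j && PySem.Set.contains b j) rest with
      | none => simp
      | some v =>
        have hv : (PySem.Set.contains a v && PySem.Set.contains b v) = true := by
          simpa using List.find?_some hf
        have hiv : i ≠ v := fun he => h (he ▸ hv)
        simp [hiv]

theorem takeWhile_ne_append (pre suf : List Int) (v : Int) (h : v ∉ pre) :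
    (pre ++ v :: suf).takeWhile (fun i => !decide (i = v)) = pre := by
  induction pre with
  | nil => simp
  | cons i rest ih =>
    simp only [List.mem_cons, not_or] at h
    have : i ≠ v := fun he => h.1 he.symm
    simp [this, ih h.2]

theorem take_length_succ_append (pre suf : List Int) (v : Int) :
    (pre ++ v :: suf).take (pre.length + 1) = pre ++ [v] := by
  induction pre with
  | nil => simp
  | cons i rest ih => simp [ih]

-- first-occurrence dict: its lookups are index?, its keys are the ordered dedup
theorem firstPosLoop_snoc (xs : List Int) (a : Int) :
    firstPosLoop (xs ++ [a]) =
      PySem.Dict.setdefault (firstPosLoop xs) a (xs.length : Int) := by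
  unfold firstPosLoop
  rw [PySem.List.enumerate_append, List.foldl_append]
  simp [PySem.List.enumerate_cons]

theorem get?_firstPosLoop (l : List Int) (v : Int) :
    (firstPosLoop l).get? v = (PySem.List.index? l v).map (fun n => (n : Int)) := by
  induction l using List.reverseRecOn generalizing v with
  | nil => simp [firstPosLoop, PySem.List.enumerate, PySem.Dict.get?_empty, PySem.List.index?]
  | append_singleton xs a ih =>
    rw [firstPosLoop_snoc]
    by_cases hm : a ∈ xs
    · have hc : (firstPosLoop xs).contains a = true := by
        have hs := (PySem.List.index?_isSome_iff xs a).mpr hm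
        obtain ⟨n, hn⟩ := Option.isSome_iff_exists.mp hs
        rw [PySem.Dict.contains_eq_isSome_get?, ih a, hn]
        simp
      rw [PySem.Dict.setdefault_of_contains _ _ hc, ih v]
      by_cases hv : v ∈ xs
      · rw [PySem.List.index?_append_of_mem _ hv]
      · have h1 : PySem.List.index? xs v = none := by
          rw [PySem.List.index?_eq_none_iff]; exact hv
        have hva : v ≠ a := fun h => hv (h ▸ hm)
        have h2 : PySem.List.index? (xs ++ [a]) v = none := by
          rw [PySem.List.index?_eq_none_iff]; simp [hv, hva]
        rw [h1, h2]
    · have hc : (firstPosLoop xs).contains a = false := by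
        have hs := (PySem.List.index?_eq_none_iff xs a).mpr hm
        rw [PySem.Dict.contains_eq_isSome_get?, ih a, hs]
        simp
      rw [PySem.Dict.setdefault_of_not_contains _ _ hc]
      by_cases hv : v = a
      · subst hv
        rw [PySem.Dict.get?_insert_self, PySem.List.index?_append_singleton_self _ _ hm]
        simp
      · rw [PySem.Dict.get?_insert_of_ne _ _ hv, ih v]
        by_cases hvx : v ∈ xs
        · rw [PySem.List.index?_append_of_mem _ hvx]
        · have h1 : PySem.List.index? xs v = none := by
            rw [PySem.List.index?_eq_none_iff]; exact hvx
          have h2 : PySem.List.index? (xs ++ [a]) v = none := by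
            rw [PySem.List.index?_eq_none_iff]; simp [hvx, hv]
          rw [h1, h2]

theorem keys_firstPosLoop (l : List Int) :
    (firstPosLoop l).keys = PySem.Set.ofList l := by
  induction l using List.reverseRecOn with
  | nil => simp [firstPosLoop, PySem.List.enumerate, PySem.Dict.keys_empty, PySem.Set.ofList_nil]
  | append_singleton xs a ih =>
    rw [firstPosLoop_snoc, PySem.Set.ofList_append_singleton, ← ih]
    by_cases hc : (firstPosLoop xs).contains a = true
    · rw [PySem.Dict.setdefault_of_contains _ _ hc]
      have hmem : a ∈ (firstPosLoop xs).keys := (PySem.Dict.contains_iff_mem_keys _ _).mp hc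
      have : PySem.Set.contains (firstPosLoop xs).keys a = true := by
        rw [PySem.Set.contains_iff]; exact hmem
      simp [PySem.Set.add, hmem]
    · have hc' : (firstPosLoop xs).contains a = false := by simpa using hc
      rw [PySem.Dict.setdefault_of_not_contains _ _ hc',
        PySem.Dict.keys_insert_of_not_contains _ _ hc']
      have hmem : a ∉ (firstPosLoop xs).keys := fun h =>
        hc ((PySem.Dict.contains_iff_mem_keys _ _).mpr h)
      have : PySem.Set.contains (firstPosLoop xs).keys a = false := by
        simp [hmem]
      simp [PySem.Set.add, hmem]

theorem getD_firstPosLoop_of_index? (l : List Int) (v : Int) (i : Nat)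
    (h : PySem.List.index? l v = some i) :
    PySem.Dict.getD (firstPosLoop l) v 0 = (i : Int) := by
  rw [PySem.Dict.getD_eq_get?_getD, get?_firstPosLoop, h]; rfl

-- dedup of a prefix = position-filtered dedup
theorem ofList_take (l : List Int) (n : Nat) :
    PySem.Set.ofList (l.take n)
      = (PySem.Set.ofList l).filter
          (fun v => (PySem.List.index? l v).any (fun i => decide (i < n))) := by
  induction l generalizing n with
  | nil => simp [PySem.Set.ofList_nil]
  | cons a t ih =>
    cases n with
    | zero =>
      simp only [List.take_zero, PySem.Set.ofList_nil]
      symm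
      rw [List.filter_eq_nil_iff]
      intro v _
      cases h : PySem.List.index? (a :: t) v <;> simp [Option.any]
    | succ m =>
      rw [List.take_succ_cons, PySem.Set.ofList_cons, PySem.Set.ofList_cons]
      have hpa : ((PySem.List.index? (a :: t) a).any (fun i => decide (i < m + 1))) = true := by
        rw [PySem.List.index?_cons_self]; simp
      simp only [List.filter_cons, hpa, if_true]
      congr 1
      rw [PySem.Set.discard, PySem.Set.discard, ih m, List.filter_filter, List.filter_filter]
      apply List.filter_congr
      intro v hv
      have hvt : v ∈ t := (PySem.Set.mem_ofList _ _).mp hv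
      obtain ⟨i, hi⟩ := Option.isSome_iff_exists.mp ((PySem.List.index?_isSome_iff t v).mpr hvt)
      by_cases hva : v = a
      · subst hva; simp
      · have hcons : PySem.List.index? (a :: t) v = some (i + 1) := by
          rw [PySem.List.index?_cons_of_ne _ (fun h => hva h.symm), hi]; rfl
        have h1 : PySem.List.index? t v = some i := hi
        simp only [h1, hcons, Option.any, Bool.and_comm]
        congr 1
        simp

theorem update_ofList (s : PySem.Set Int) (t : List Int) :
    PySem.Set.update s (PySem.Set.ofList t) = PySem.Set.update s t := by
  rw [PySem.Set.update_eq_append_filter, PySem.Set.update_eq_append_filter,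
    PySem.Set.ofList_ofList]

-- the common core: A's loop+path result equals B's dict/argmin result, for the chosen x and other
theorem gcycle_core (pA pB x other : List Int)
    (hcond : ∀ i ∈ x,
      (PySem.Set.contains (PySem.Set.ofList pA) i && PySem.Set.contains (PySem.Set.ofList pB) i)
        = PySem.Set.contains (PySem.Set.ofList other) i) :
    PySem.Set.ofList
      (path_to_k other
        (gcycleLoop (PySem.Set.ofList pA) (PySem.Set.ofList pB) x).2
        (gcycleLoop (PySem.Set.ofList pA) (PySem.Set.ofList pB) x).1)
    = (match PySem.List.min?
          (PySem.Set.inter (PySem.Set.ofList (firstPosLoop x).keys) (firstPosLoop other).keys)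
          (fun v => PySem.Dict.getD (firstPosLoop x) v 0) with
       | none => PySem.Set.union (PySem.Set.ofList (firstPosLoop x).keys)
           (PySem.Set.ofList (firstPosLoop other).keys)
       | some k =>
           PySem.Set.union
             (PySem.Set.ofList ((firstPosLoop x).keys.filter
               (fun v => PySem.Dict.getD (firstPosLoop x) v 0 ≤ PySem.Dict.getD (firstPosLoop x) k 0)))
             (PySem.Set.ofList ((firstPosLoop other).keys.filter
               (fun v => PySem.Dict.getD (firstPosLoop other) v 0 < PySem.Dict.getD (firstPosLoop other) k 0)))) := by
  rw [gcycleLoop_eq, find?_congr_mem x _ _ hcond]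
  have hcommon : PySem.Set.inter (PySem.Set.ofList (firstPosLoop x).keys) (firstPosLoop other).keys
      = List.filter (fun v => PySem.Set.contains (PySem.Set.ofList other) v) (PySem.Set.ofList x) := by
    rw [keys_firstPosLoop, keys_firstPosLoop, PySem.Set.ofList_ofList]
    rfl
  rw [hcommon]
  cases hf : List.find? (fun i => PySem.Set.contains (PySem.Set.ofList other) i) x with
  | none =>
    have hnone := List.find?_eq_none.mp hf
    have hcnil : List.filter (fun v => PySem.Set.contains (PySem.Set.ofList other) v)
        (PySem.Set.ofList x) = [] := by
      rw [List.filter_eq_nil_iff]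
      intro v hv
      simpa using hnone v ((PySem.Set.mem_ofList _ _).mp hv)
    rw [hcnil]
    have hA : path_to_k other none x = x ++ other := by
      rw [path_to_k_eq]
      congr 1
      rw [List.takeWhile_eq_self_iff]
      intro v _
      simp
    show PySem.Set.ofList (path_to_k other none x)
        = PySem.Set.union (PySem.Set.ofList (firstPosLoop x).keys)
            (PySem.Set.ofList (firstPosLoop other).keys)
    rw [hA, keys_firstPosLoop, keys_firstPosLoop, PySem.Set.ofList_ofList,
      PySem.Set.ofList_ofList, PySem.Set.union, PySem.Set.ofList_append, update_ofList]
  | some k =>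
    obtain ⟨hpk, pre, suf, hx, hpre⟩ := List.find?_eq_some_iff_append.mp hf
    have hkother : k ∈ other :=
      (PySem.Set.mem_ofList _ _).mp ((PySem.Set.contains_iff _ _).mp hpk)
    have hknpre : k ∉ pre := fun hm => by simpa [hkother] using hpre k hm
    have hidx : PySem.List.index? x k = some pre.length :=
      (PySem.List.index?_eq_some_iff x k pre.length).mpr ⟨pre, suf, hx, rfl, hknpre⟩
    have hkx : k ∈ x := by rw [hx]; simp
    have hkcommon : k ∈ List.filter (fun v => PySem.Set.contains (PySem.Set.ofList other) v)
        (PySem.Set.ofList x) :=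
      List.mem_filter.mpr ⟨(PySem.Set.mem_ofList _ _).mpr hkx, hpk⟩
    -- the argmin over the common set is A's first common element k
    have hmin : PySem.List.min?
        (List.filter (fun v => PySem.Set.contains (PySem.Set.ofList other) v) (PySem.Set.ofList x))
        (fun v => PySem.Dict.getD (firstPosLoop x) v 0) = some k := by
      cases hm : PySem.List.min?
          (List.filter (fun v => PySem.Set.contains (PySem.Set.ofList other) v) (PySem.Set.ofList x))
          (fun v => PySem.Dict.getD (firstPosLoop x) v 0) with
      | none =>
        rw [PySem.List.min?_eq_none_iff] at hm
        rw [hm] at hkcommon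
        cases hkcommon
      | some m =>
        have hmm := PySem.List.min?_mem hm
        obtain ⟨hmx', hpm⟩ := List.mem_filter.mp hmm
        have hmx : m ∈ x := (PySem.Set.mem_ofList _ _).mp hmx'
        obtain ⟨im, him⟩ := Option.isSome_iff_exists.mp ((PySem.List.index?_isSome_iff x m).mpr hmx)
        have hle := PySem.List.min?_isMin hm k hkcommon
        rw [getD_firstPosLoop_of_index? x m im him,
          getD_firstPosLoop_of_index? x k pre.length hidx] at hle
        have hle' : im ≤ pre.length := by exact_mod_cast hle
        have hmk : m = k := by
          rcases lt_or_eq_of_le hle' with hlt | heq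
          · exfalso
            obtain ⟨hik, hgm, _⟩ := PySem.List.getElem_of_index?_eq_some him
            have hg? : x[im]? = some m := by rw [List.getElem?_eq_getElem hik, hgm]
            rw [hx, List.getElem?_append_left hlt] at hg?
            have hmem : m ∈ pre := List.mem_of_getElem? hg?
            have hmother : m ∈ other :=
              (PySem.Set.mem_ofList _ _).mp ((PySem.Set.contains_iff _ _).mp hpm)
            simpa [hmother] using hpre m hmem
          · obtain ⟨hik, hgm, _⟩ := PySem.List.getElem_of_index?_eq_some him
            have hg? : x[im]? = some m := by rw [List.getElem?_eq_getElem hik, hgm]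
            rw [hx, heq] at hg?
            have hk? : (pre ++ k :: suf)[pre.length]? = some k := by simp
            rw [hg?] at hk?
            exact Option.some_inj.mp hk?
        rw [hmk]
    rw [hmin]
    simp only []
    have hgk : PySem.Dict.getD (firstPosLoop x) k 0 = (pre.length : Int) :=
      getD_firstPosLoop_of_index? x k pre.length hidx
    obtain ⟨j2, hidx2⟩ := Option.isSome_iff_exists.mp
      ((PySem.List.index?_isSome_iff other k).mpr hkother)
    obtain ⟨pre2, suf2, hol, hlen2, hknpre2⟩ := (PySem.List.index?_eq_some_iff other k j2).mp hidx2
    have hgk2 : PySem.Dict.getD (firstPosLoop other) k 0 = (j2 : Int) :=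
      getD_firstPosLoop_of_index? other k j2 hidx2
    -- B's x-contribution is the dedup of x's inclusive prefix
    have hxpart : (firstPosLoop x).keys.filter
        (fun v => PySem.Dict.getD (firstPosLoop x) v 0 ≤ PySem.Dict.getD (firstPosLoop x) k 0)
        = PySem.Set.ofList (x.take (pre.length + 1)) := by
      rw [keys_firstPosLoop, hgk, ofList_take]
      apply List.filter_congr
      intro v hv
      obtain ⟨iv, hiv⟩ := Option.isSome_iff_exists.mp
        ((PySem.List.index?_isSome_iff x v).mpr ((PySem.Set.mem_ofList _ _).mp hv))
      rw [getD_firstPosLoop_of_index? x v iv hiv, hiv]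
      simp only [Option.any]
      rw [decide_eq_decide]
      omega
    -- B's other-contribution is the dedup of other's exclusive prefix
    have hopart : (firstPosLoop other).keys.filter
        (fun v => PySem.Dict.getD (firstPosLoop other) v 0 < PySem.Dict.getD (firstPosLoop other) k 0)
        = PySem.Set.ofList (other.take j2) := by
      rw [keys_firstPosLoop, hgk2, ofList_take]
      apply List.filter_congr
      intro v hv
      obtain ⟨iv, hiv⟩ := Option.isSome_iff_exists.mp
        ((PySem.List.index?_isSome_iff other v).mpr ((PySem.Set.mem_ofList _ _).mp hv))
      rw [getD_firstPosLoop_of_index? other v iv hiv, hiv]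
      simp only [Option.any]
      rw [decide_eq_decide]
      omega
    -- A's list is exactly those two prefixes
    have hA : path_to_k other (some k) (List.takeWhile (fun i => !decide (i = k)) x ++ [k])
        = x.take (pre.length + 1) ++ other.take j2 := by
      rw [path_to_k_eq]
      have h1 : List.takeWhile (fun i => !decide (i = k)) x = pre := by
        rw [hx]; exact takeWhile_ne_append pre suf k hknpre
      have h2 : List.takeWhile (fun i => !decide (some i = some k)) other = pre2 := by
        have hfun : (fun i : Int => !decide (some i = some k)) = (fun i => !decide (i = k)) := by
          funext i; simp
        rw [hfun, hol]; exact takeWhile_ne_append pre2 suf2 k hknpre2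
      have h3 : x.take (pre.length + 1) = pre ++ [k] := by
        rw [hx]; exact take_length_succ_append pre suf k
      have h4 : other.take j2 = pre2 := by
        rw [hol, ← hlen2]; exact List.take_left
      rw [h1, h2, h3, h4]
    rw [hA, hxpart, hopart, PySem.Set.ofList_ofList, PySem.Set.ofList_ofList,
      PySem.Set.union, PySem.Set.ofList_append, update_ofList]

-- ===== VERDICT (by name: the statement is the Claim_ definition above) =====
theorem gcycle_spec : Claim_equal_gcycle := by
  intro pa pb _
  unfold Spec_gcycle
  show gcycle pa pb = gcycle_alt pa pb
  unfold gcycle gcycle_alt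
  by_cases hlen : pa.length < pb.length
  · simp only [if_pos hlen]
    exact gcycle_core pa pb pa pb (fun i hi => by
      have h1 : (PySem.Set.ofList pa).contains i = true := by
        rw [PySem.Set.contains_iff]; exact (PySem.Set.mem_ofList _ _).mpr hi
      rw [h1, Bool.true_and])
  · simp only [if_neg hlen]
    by_cases hba : pb = pa
    · subst hba
      rw [if_pos rfl]
      exact gcycle_core pb pb pb pb (fun i _ => by rw [Bool.and_self])
    · simp only [if_neg hba]
      exact gcycle_core pa pb pb pa (fun i hi => by
        have h1 : (PySem.Set.ofList pb).contains i = true := by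
          rw [PySem.Set.contains_iff]; exact (PySem.Set.mem_ofList _ _).mpr hi
        rw [h1, Bool.and_true])
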